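-- pv_equiv track=rewrite | github.com/AnAs101AlAa/regex-to-DFA-converter | convert.py | exclusive_bracket
-- ===== SOURCE A (Python) =====
-- def exclusive_bracket(index, pattern):
--     postfix_string = ""
--     concat_flag = False
--     while index < len(pattern):
--         if (pattern[index] == ']'):
--             return postfix_string, index
--         if (index < len(pattern) - 1 and pattern[index + 1] == '-'):
--             postfix_string += pattern[index]
--             postfix_string += pattern[index + 2]
--             postfix_string += '-'
--             if concat_flag == True:
--                 postfix_string += "|"
--             else:
--                 concat_flag = True
--             index += 2
--         else:
--             if concat_flag == True:
--                 postfix_string += pattern[index]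
--                 postfix_string += '|'
--             else:
--                 concat_flag = True
--                 postfix_string += pattern[index]
--         index += 1
-- ===== SOURCE B (Python) =====
-- def exclusive_bracket(index, pattern):
--     # One-char-at-a-time automaton: no lookahead and no index jumps; a pending
--     # char waits to see whether a '-' follows, rng marks "expecting range end".
--     # Where A raises IndexError on a trailing '-', this falls off the loop and
--     # returns None (those inputs are outside the claimed precondition).
--     out = ""
--     pending = None
--     rng = False
--     for i in range(index, len(pattern)):
--         c = pattern[i]
--         if rng:
--             tok = pending + c + '-'
--             out += tok + "|" if out else tok
--             pending, rng = None, False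
--         elif c == ']':
--             if pending is not None:
--                 out += pending + "|" if out else pending
--             return out, i
--         elif c == '-' and pending is not None:
--             rng = True
--         else:
--             if pending is not None:
--                 out += pending + "|" if out else pending
--             pending = c
--     return None
-- ===== Notes on version B (the rewrite author's own statement) =====
-- stated objective: alternative
-- what changed: Replaces A's lookahead-and-jump while loop (peeking pattern[index+1], stepping index by 1 or 3, and a concat_flag) by a uniform one-character-at-a-time automaton over range(index, len(pattern)) whose state is a pending character and a range-end mode, with no lookahead and no index jumps.
-- outside the precondition, e.g. on exclusive_bracket(1, 'x-]z-'): A returns ('-', 2), B returns ('-', 2); on exclusive_bracket(-3, ']a-'): A returns ('', -3), B returns ('', -3); on exclusive_bracket(0, 'ab-'): A raises IndexError, B returns None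
import Mathlib
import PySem

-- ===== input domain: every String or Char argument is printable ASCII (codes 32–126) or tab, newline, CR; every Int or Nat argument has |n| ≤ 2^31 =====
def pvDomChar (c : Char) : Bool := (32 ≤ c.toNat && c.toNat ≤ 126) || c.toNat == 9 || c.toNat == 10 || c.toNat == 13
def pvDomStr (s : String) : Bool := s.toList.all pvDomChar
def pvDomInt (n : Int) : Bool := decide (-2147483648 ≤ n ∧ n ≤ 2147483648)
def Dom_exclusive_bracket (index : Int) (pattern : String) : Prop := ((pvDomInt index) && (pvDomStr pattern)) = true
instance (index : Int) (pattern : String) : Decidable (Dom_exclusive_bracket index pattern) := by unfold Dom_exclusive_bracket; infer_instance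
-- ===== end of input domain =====

-- B replaces A's lookahead-and-jump scan (index += 1 or 3, concat_flag) by a uniform
-- one-character-at-a-time automaton (pending char + range mode); objective: alternative.
-- Where A raises IndexError on a trailing '-', B falls off its loop and returns None
-- (those inputs are outside Pre_).

-- ===== PORT A =====
-- A's while loop: state = (index, postfix_string, concat_flag). fuel is only a structural
-- bound on the number of iterations (each iteration advances index by at least 1, so
-- (len - index).toNat iterations always suffice and fuel 0 coincides with the loop
-- condition index < len failing); the `none` arms of the pyGet? matches are Python
-- IndexError sites, excluded by Pre_.
def ebA_loop (pattern : List Char) (fuel : Nat) (index : Int) (pf : List Char)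
    (concat : Bool) : Option (String × Int) :=
  match fuel with
  | 0 => none
  | f + 1 =>
    if index < (pattern.length : Int) then
      match PySem.List.pyGet? pattern index with
      | none => none  -- IndexError (index < -len), excluded by Pre_
      | some c =>
        if c = ']' then some (String.ofList pf, index)
        else if index < (pattern.length : Int) - 1 ∧ PySem.List.pyGet? pattern (index + 1) = some '-' then
          match PySem.List.pyGet? pattern (index + 2) with
          | none => none  -- IndexError (trailing '-'), excluded by Pre_
          | some c2 =>
            ebA_loop pattern f (index + 3)
              (pf ++ [c, c2, '-'] ++ (if concat then ['|'] else [])) true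
        else
          ebA_loop pattern f (index + 1)
            (if concat then pf ++ [c, '|'] else pf ++ [c]) true
    else none

def exclusive_bracket (index : Int) (pattern : String) : Option (String × Int) :=
  ebA_loop pattern.toList ((pattern.toList.length : Int) - index).toNat index [] false

-- ===== PORT B =====
-- Source B's for-loop over range(index, len(pattern)): fuel counts the remaining loop
-- iterations (len - i at entry, one per character), i is the loop variable, state =
-- (out, pending, rng); the pyGet? `none` arm is the IndexError of pattern[i] with
-- i < -len (B raises there too, excluded by Pre_); the rng/pending-none arm is
-- unreachable (rng is only ever set while pending holds a char); running out of fuel is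
-- the loop ending, returning None as in Source B.
def ebB_loop (pattern : List Char) (fuel : Nat) (i : Int) (out : List Char)
    (pending : Option Char) (rng : Bool) : Option (String × Int) :=
  match fuel with
  | 0 => none
  | f + 1 =>
    match PySem.List.pyGet? pattern i with
    | none => none  -- IndexError, excluded by Pre_
    | some c =>
      if rng then
        match pending with
        | none => none  -- unreachable: rng is only ever set while pending is a char
        | some p =>
          ebB_loop pattern f (i + 1)
            (if out.isEmpty then out ++ [p, c, '-'] else out ++ [p, c, '-', '|']) none false
      else if c = ']' then
        match pending with
        | none => some (String.ofList out, i)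
        | some p => some (String.ofList (if out.isEmpty then out ++ [p] else out ++ [p, '|']), i)
      else if c = '-' ∧ pending.isSome then
        ebB_loop pattern f (i + 1) out pending true
      else
        match pending with
        | none => ebB_loop pattern f (i + 1) out (some c) false
        | some p =>
          ebB_loop pattern f (i + 1)
            (if out.isEmpty then out ++ [p] else out ++ [p, '|']) (some c) false

def exclusive_bracket_alt (index : Int) (pattern : String) : Option (String × Int) :=
  ebB_loop pattern.toList ((pattern.toList.length : Int) - index).toNat index [] none false

-- ===== PRECONDITION & SPEC =====
-- Pre_ excludes exactly A's IndexError inputs, stated in closed form: a start index below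
-- -len, and patterns ending in '-' that the scan can run off the end of; since "the scan
-- runs off" is not closed-form, the trailing-'-' case is over-approximated: it stays
-- excluded unless some ']' at or after a nonnegative start, not preceded by '-', is
-- guaranteed to stop the scan first — so a few '-'-final inputs on which A returns
-- normally are also excluded (B agrees with A on them; see the cited examples).
def Pre_exclusive_bracket (index : Int) (pattern : String) : Prop :=
  (pattern.toList.length : Int) ≤ index ∨
    (-(pattern.toList.length : Int) ≤ index ∧
      (pattern.toList.getLast? ≠ some '-' ∨
        (0 ≤ index ∧ ∃ p < pattern.toList.length, index.toNat ≤ p ∧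
          pattern.toList[p]? = some ']' ∧
          (p = index.toNat ∨ pattern.toList[p - 1]? ≠ some '-'))))
instance (index : Int) (pattern : String) : Decidable (Pre_exclusive_bracket index pattern) := by
  unfold Pre_exclusive_bracket; infer_instance

def pvWitness_exclusive_bracket : Int × String := (0, "a-cz]")

def Spec_exclusive_bracket (index : Int) (pattern : String) (out : Option (String × Int)) : Prop := out = exclusive_bracket_alt index pattern
instance (index : Int) (pattern : String) (out : Option (String × Int)) : Decidable (Spec_exclusive_bracket index pattern out) := by unfold Spec_exclusive_bracket; infer_instance

-- ===== CLAIM (what is proved, stated in full; the proofs are below) =====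
def Claim_equal_exclusive_bracket : Prop := ∀ (index : Int) (pattern : String), Dom_exclusive_bracket index pattern → Pre_exclusive_bracket index pattern → Spec_exclusive_bracket index pattern (exclusive_bracket index pattern)

-- ===== LEMMAS AND PROOFS =====

-- pyGet? returns some exactly on -len ≤ i < len.
theorem eb_pyGet_bounds {α : Type} (l : List α) (i : Int) (c : α)
    (h : PySem.List.pyGet? l i = some c) : -(l.length : Int) ≤ i ∧ i < l.length := by
  by_contra hc
  have : PySem.List.pyGet? l i = none := by
    rw [PySem.List.pyGet?_eq_none_iff]
    intro hin
    exact hc (by simpa [PySem.Raise.InRange] using hin)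
  simp [this] at h

theorem eb_pyGet_some {α : Type} (l : List α) (i : Int)
    (h1 : -(l.length : Int) ≤ i) (h2 : i < l.length) : ∃ c, PySem.List.pyGet? l i = some c := by
  cases hg : PySem.List.pyGet? l i with
  | some c => exact ⟨c, rfl⟩
  | none =>
    rw [PySem.List.pyGet?_eq_none_iff] at hg
    exact absurd (by simp [PySem.Raise.InRange]; omega) hg

-- A single-character token is appended the same way by both loops.
theorem eb_app_single (out : List Char) (c : Char) :
    (if out.isEmpty then out ++ [c] else out ++ [c, '|']) =
      (if (!out.isEmpty) = true then out ++ [c, '|'] else out ++ [c]) := by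
  cases out <;> simp

-- A's loop returns none on any fuel once the loop condition fails.
theorem ebA_stop (pattern : List Char) (g : Nat) (i : Int) (pf : List Char) (concat : Bool)
    (h : ¬ i < (pattern.length : Int)) : ebA_loop pattern g i pf concat = none := by
  cases g with
  | zero => rw [ebA_loop]
  | succ g => rw [ebA_loop]; simp [h]

-- Key invariant: B sitting just past a pending token-start character c (pending = some c,
-- rng = false, with the matching remaining fuel) computes what A computes from the
-- position of c, on any sufficient A-side fuel; strong induction on B's fuel.
theorem eb_pend (pattern : List Char) :
    ∀ (f : Nat) (i : Int) (out : List Char) (c : Char) (g : Nat),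
      f = ((pattern.length : Int) - (i + 1)).toNat →
      ((pattern.length : Int) - i).toNat ≤ g →
      PySem.List.pyGet? pattern i = some c → ¬ c = ']' →
      ebB_loop pattern f (i + 1) out (some c) false = ebA_loop pattern g i out (!out.isEmpty) := by
  intro f
  induction f using Nat.strong_induction_on with
  | _ f ih =>
    intro i out c g hf hg hget hc
    have hb := eb_pyGet_bounds pattern i c hget
    obtain ⟨g1, rfl⟩ : ∃ g1, g = g1 + 1 := ⟨g - 1, by omega⟩
    rw [ebA_loop]
    simp only [hb.2, if_true, hget, if_neg hc]
    by_cases h1 : i + 1 < (pattern.length : Int)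
    · -- the next character exists
      obtain ⟨f1, rfl⟩ : ∃ f1, f = f1 + 1 := ⟨f - 1, by omega⟩
      obtain ⟨c1, hget1⟩ := eb_pyGet_some pattern (i + 1) (by omega) h1
      rw [ebB_loop]
      simp only [hget1, Bool.false_eq_true, if_false]
      by_cases hc1 : c1 = ']'
      · -- next char is ']': B returns here; A takes the single branch, then returns at i+1
        have hA : ¬ (i < (pattern.length : Int) - 1 ∧ (some c1 : Option Char) = some '-') := by
          rintro ⟨-, h⟩
          rw [hc1] at h
          exact absurd (Option.some.inj h) (by decide)
        simp only [if_pos hc1, if_neg hA]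
        obtain ⟨g2, rfl⟩ : ∃ g2, g1 = g2 + 1 := ⟨g1 - 1, by omega⟩
        rw [ebA_loop]
        simp only [h1, if_true, hget1, if_pos hc1]
        rw [eb_app_single]
      · by_cases hd : c1 = '-'
        · -- range branch: B enters range mode, consumes the range end, and lands at i+3
          have hA : i < (pattern.length : Int) - 1 ∧ (some c1 : Option Char) = some '-' :=
            ⟨by omega, by rw [hd]⟩
          have hB : c1 = '-' ∧ (some c).isSome = true := ⟨hd, rfl⟩
          simp only [if_neg hc1, if_pos hB, if_pos hA]
          by_cases h2 : i + 2 < (pattern.length : Int)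
          · obtain ⟨f2, rfl⟩ : ∃ f2, f1 = f2 + 1 := ⟨f1 - 1, by omega⟩
            obtain ⟨c2, hget2⟩ := eb_pyGet_some pattern (i + 2) (by omega) h2
            rw [ebB_loop]
            simp only [show i + 1 + 1 = i + 2 from by ring, hget2, reduceIte]
            have hout : (if out.isEmpty then out ++ [c, c2, '-'] else out ++ [c, c2, '-', '|']) =
                out ++ [c, c2, '-'] ++ (if (!out.isEmpty) = true then ['|'] else []) := by
              cases out <;> simp
            rw [hout]
            set out2 : List Char :=
              out ++ [c, c2, '-'] ++ (if (!out.isEmpty) = true then ['|'] else []) with hout2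
            have hne : out2.isEmpty = false := by
              rw [hout2]; cases out <;> simp
            -- boundary step at i + 3
            by_cases h3 : i + 3 < (pattern.length : Int)
            · obtain ⟨f3, rfl⟩ : ∃ f3, f2 = f3 + 1 := ⟨f2 - 1, by omega⟩
              obtain ⟨c3, hget3⟩ := eb_pyGet_some pattern (i + 3) (by omega) h3
              rw [ebB_loop]
              simp only [show i + 2 + 1 = i + 3 from by ring, hget3, Bool.false_eq_true,
                if_false]
              by_cases hc3 : c3 = ']'
              · obtain ⟨g2, rfl⟩ : ∃ g2, g1 = g2 + 1 := ⟨g1 - 1, by omega⟩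
                rw [ebA_loop]
                simp [h3, hget3, hc3]
              · simp only [if_neg hc3, Option.isSome_none, Bool.false_eq_true, and_false,
                  if_false]
                rw [show i + 3 + 1 = (i + 3) + 1 from rfl,
                  ih f3 (by omega) (i + 3) out2 c3 g1 (by omega) (by omega) hget3 hc3]
                simp [hne]
            · obtain rfl : f2 = 0 := by omega
              rw [ebB_loop, ebA_stop pattern g1 (i + 3) out2 true h3]
          · obtain rfl : f1 = 0 := by omega
            have hnone : PySem.List.pyGet? pattern (i + 2) = none := by
              rw [PySem.List.pyGet?_eq_none_iff]
              simp only [PySem.Raise.InRange, not_and]; omega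
            rw [ebB_loop]
            simp only [hnone]
        · -- ordinary character: B closes token c, holds c1 pending; A takes the single branch
          have hA : ¬ (i < (pattern.length : Int) - 1 ∧ (some c1 : Option Char) = some '-') := by
            rintro ⟨-, h⟩
            exact hd (Option.some.inj h)
          have hB : ¬ (c1 = '-' ∧ (some c).isSome = true) := by
            rintro ⟨h, -⟩; exact hd h
          simp only [if_neg hc1, if_neg hB, if_neg hA]
          rw [eb_app_single, show i + 1 + 1 = (i + 1) + 1 from rfl,
            ih f1 (by omega) (i + 1)
              (if (!out.isEmpty) = true then out ++ [c, '|'] else out ++ [c]) c1 g1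
              (by omega) (by omega) hget1 hc1]
          have : (!(if (!out.isEmpty) = true then out ++ [c, '|'] else out ++ [c]).isEmpty) =
              true := by cases out <;> simp
          rw [this]
    · -- i is the last position: A takes the single branch and both loops then end
      obtain rfl : f = 0 := by omega
      have hA : ¬ (i < (pattern.length : Int) - 1 ∧
          PySem.List.pyGet? pattern (i + 1) = some '-') := by
        rintro ⟨h, -⟩; omega
      rw [ebB_loop, ebA_stop pattern g1 (i + 1) _ true h1]
      simp only [if_neg hA]

-- Boundary form: B with no pending character and no range mode equals A at the same position.
theorem eb_bound (pattern : List Char) (i : Int) (out : List Char) :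
    ebB_loop pattern ((pattern.length : Int) - i).toNat i out none false =
      ebA_loop pattern ((pattern.length : Int) - i).toNat i out (!out.isEmpty) := by
  by_cases h : i < (pattern.length : Int)
  · obtain ⟨f0, hf0⟩ : ∃ f0, ((pattern.length : Int) - i).toNat = f0 + 1 :=
      ⟨((pattern.length : Int) - i).toNat - 1, by omega⟩
    cases hget : PySem.List.pyGet? pattern i with
    | none => rw [hf0, ebB_loop, ebA_loop]; simp [h, hget]
    | some c =>
      by_cases hc : c = ']'
      · rw [hf0, ebB_loop, ebA_loop]; simp [h, hget, hc]
      · rw [hf0, ebB_loop]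
        simp only [hget, Bool.false_eq_true, if_false, if_neg hc, Option.isSome_none,
          and_false]
        rw [hf0.symm]
        exact eb_pend pattern f0 i out c ((pattern.length : Int) - i).toNat (by omega)
          le_rfl hget hc
  · rw [show ((pattern.length : Int) - i).toNat = 0 from by omega, ebB_loop, ebA_loop]

-- ===== VERDICT (by name: the statement is the Claim_ definition above) =====
theorem exclusive_bracket_spec : Claim_equal_exclusive_bracket := by
  intro index pattern _ _
  unfold Spec_exclusive_bracket exclusive_bracket exclusive_bracket_alt
  rw [eb_bound]
  rfl
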